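-- pv_equiv track=rewrite | github.com/ShapeLayer/training | tasks/online_judge/baekjoon/python/12086.py | compute
-- ===== SOURCE A (Python) =====
-- def compute(n: int, cards: list[str]) -> int:
--     peek = cards[0]
--     counts = 0
--     for i in range(1, n):
--         if peek > cards[i]:
--             counts += 1
--         else:
--             peek = cards[i]
--     return counts
-- ===== SOURCE B (Python) =====
-- def compute(n: int, cards: list[str]) -> int:
--     # two passes: prefix maxima first, then count positions that drop below the running max
--     m = cards[0]
--     pm = []
--     for c in cards:
--         m = m if m > c else c
--         pm.append(m)
--     return sum(1 for i in range(1, n) if pm[i - 1] > cards[i])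
-- ===== Notes on version B (the rewrite author's own statement) =====
-- stated objective: alternative
-- what changed: Single fused loop carrying (running max, counter) is split into two passes: one building the prefix-maximum list over the whole cards list, then an index pass over range(1, n) summing the drops.
import Mathlib
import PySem

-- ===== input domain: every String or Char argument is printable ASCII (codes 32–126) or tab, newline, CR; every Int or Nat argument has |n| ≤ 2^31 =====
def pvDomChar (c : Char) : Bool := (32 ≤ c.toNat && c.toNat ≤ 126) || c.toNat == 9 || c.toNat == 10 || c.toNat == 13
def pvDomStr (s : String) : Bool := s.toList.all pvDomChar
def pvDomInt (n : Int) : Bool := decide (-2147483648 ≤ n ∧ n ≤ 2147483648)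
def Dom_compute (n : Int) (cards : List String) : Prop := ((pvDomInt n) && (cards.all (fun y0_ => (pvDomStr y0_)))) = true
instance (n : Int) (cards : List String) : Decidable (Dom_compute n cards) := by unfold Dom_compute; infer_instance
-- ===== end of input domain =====

-- B splits A's single fused loop into a prefix-maximum pass plus a counting pass (objective: alternative decomposition, same cost).

-- ===== PORT A =====
def compute (n : Int) (cards : List String) : Int :=
  let peek := PySem.List.pyGetD cards 0 ""
  ((PySem.List.pyRange 1 n 1).foldl
    (fun (st : String × Int) i =>
      if PySem.List.pyGetD cards i "" < st.1 then (st.1, st.2 + 1)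
      else (PySem.List.pyGetD cards i "", st.2))
    (peek, 0)).2

-- ===== PORT B =====
def compute_alt (n : Int) (cards : List String) : Int :=
  let pm := (cards.foldl
    (fun (st : String × List String) c =>
      let m := if c < st.1 then st.1 else c
      (m, st.2 ++ [m]))
    (PySem.List.pyGetD cards 0 "", [])).2
  ((PySem.List.pyRange 1 n 1).map
    (fun i => if PySem.List.pyGetD cards i "" < PySem.List.pyGetD pm (i - 1) "" then (1 : Int) else 0)).sum

-- ===== PRECONDITION & SPEC =====
-- A raises IndexError when cards is empty (cards[0]) or when n exceeds len(cards) (cards[i]); Pre_ excludes exactly those.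
def Pre_compute (n : Int) (cards : List String) : Prop := cards ≠ [] ∧ n ≤ (cards.length : Int)
instance (n : Int) (cards : List String) : Decidable (Pre_compute n cards) := by unfold Pre_compute; infer_instance
def pvWitness_compute : Int × List String := (3, ["b", "a", "c"])

def Spec_compute (n : Int) (cards : List String) (out : Int) : Prop := out = compute_alt n cards
instance (n : Int) (cards : List String) (out : Int) : Decidable (Spec_compute n cards out) := by unfold Spec_compute; infer_instance

-- ===== CLAIM (what is proved, stated in full; the proofs are below) =====
def Claim_equal_compute : Prop := ∀ (n : Int) (cards : List String), Dom_compute n cards → Pre_compute n cards → Spec_compute n cards (compute n cards)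

-- ===== LEMMAS AND PROOFS =====

-- reference prefix-maximum list: pmList m cs = running maxima of cs started from m
def pmList (m : String) : List String → List String
  | [] => []
  | c :: cs => (if c < m then m else c) :: pmList (if c < m then m else c) cs

theorem foldl_pm_snd (cs : List String) (m : String) (acc : List String) :
    (cs.foldl (fun (st : String × List String) c =>
      let m := if c < st.1 then st.1 else c
      (m, st.2 ++ [m])) (m, acc)).2 = acc ++ pmList m cs := by
  induction cs generalizing m acc with
  | nil => simp [pmList]
  | cons c cs ih =>
    rw [List.foldl_cons]
    show (List.foldl _ ((if c < m then m else c), acc ++ [if c < m then m else c]) cs).2 = _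
    rw [ih]
    simp [pmList]

theorem pmList_getD_succ (m : String) (cs : List String) (k : Nat) (h : k + 1 < cs.length) :
    (pmList m cs).getD (k + 1) "" =
      if cs.getD (k + 1) "" < (pmList m cs).getD k "" then (pmList m cs).getD k ""
      else cs.getD (k + 1) "" := by
  induction cs generalizing m k with
  | nil => simp at h
  | cons c cs ih =>
    match k with
    | 0 =>
      match cs, h with
      | c2 :: cs2, _ => simp [pmList]
    | k + 1 =>
      have h' : k + 1 < cs.length := by simpa using h
      simpa [pmList] using ih (if c < m then m else c) k h'

-- loop invariant for A's fold: state = (prefix max up to k-1, B's partial sum)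
theorem loopA (cards : List String) (hne : cards ≠ []) (k : Nat) (hk1 : 1 ≤ k)
    (hk : k ≤ cards.length) :
    (PySem.List.pyRange 1 (k : Int) 1).foldl
      (fun (st : String × Int) i =>
        if PySem.List.pyGetD cards i "" < st.1 then (st.1, st.2 + 1)
        else (PySem.List.pyGetD cards i "", st.2))
      (PySem.List.pyGetD cards 0 "", 0)
    = ((pmList (PySem.List.pyGetD cards 0 "") cards).getD (k - 1) "",
       ((PySem.List.pyRange 1 (k : Int) 1).map
         (fun i => if PySem.List.pyGetD cards i "" <
             PySem.List.pyGetD (pmList (PySem.List.pyGetD cards 0 "") cards) (i - 1) "" then (1 : Int) else 0)).sum) := by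
  induction k, hk1 using Nat.le_induction with
  | base =>
    have h1 : ((1 : Nat) : Int) = 1 := by norm_num
    rw [h1, PySem.List.pyRange_one_eq_nil (by omega)]
    match cards, hne with
    | c :: cs, _ => simp [pmList, PySem.List.pyGetD_zero_cons]
  | succ k hk1 ih =>
    have hklen : k ≤ cards.length := by omega
    have hcast : ((k + 1 : Nat) : Int) = (k : Int) + 1 := by push_cast; ring
    rw [hcast, PySem.List.pyRange_one_succ_right (by exact_mod_cast hk1), List.foldl_append,
      List.map_append, ih hklen]
    have hik : PySem.List.pyGetD cards (k : Int) "" = cards.getD k "" := by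
      simp [PySem.List.pyGetD_natCast]
    have hkm1 : ((k : Int) - 1) = ((k - 1 : Nat) : Int) := by omega
    have hpm : PySem.List.pyGetD (pmList (PySem.List.pyGetD cards 0 "") cards) ((k : Int) - 1) ""
        = (pmList (PySem.List.pyGetD cards 0 "") cards).getD (k - 1) "" := by
      rw [hkm1]; simp [PySem.List.pyGetD_natCast]
    have hstep : (pmList (PySem.List.pyGetD cards 0 "") cards).getD k "" =
        if cards.getD k "" < (pmList (PySem.List.pyGetD cards 0 "") cards).getD (k - 1) ""
        then (pmList (PySem.List.pyGetD cards 0 "") cards).getD (k - 1) ""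
        else cards.getD k "" := by
      have hk' : (k - 1) + 1 < cards.length := by omega
      have := pmList_getD_succ (PySem.List.pyGetD cards 0 "") cards (k - 1) hk'
      have hkeq : (k - 1) + 1 = k := by omega
      rw [hkeq] at this
      exact this
    simp only [List.foldl_cons, List.foldl_nil, List.map_cons, List.map_nil,
      List.sum_append, List.sum_cons, List.sum_nil, Nat.add_sub_cancel]
    rw [hik, hpm, hstep]
    by_cases hc : cards.getD k "" < (pmList (PySem.List.pyGetD cards 0 "") cards).getD (k - 1) ""
    · simp only [if_pos hc]; ring_nf
    · simp only [if_neg hc]; ring_nf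

-- ===== VERDICT (by name: the statement is the Claim_ definition above) =====
theorem compute_spec : Claim_equal_compute := by
  intro n cards _ hpre
  obtain ⟨hne, hlen⟩ := hpre
  unfold Spec_compute compute compute_alt
  rw [foldl_pm_snd]
  simp only [List.nil_append]
  by_cases hn : n ≤ 1
  · rw [PySem.List.pyRange_one_eq_nil hn]
    simp
  · have h1n : 1 ≤ n := by omega
    have hk1 : 1 ≤ n.toNat := by omega
    have hklen : n.toNat ≤ cards.length := by omega
    have hcast : ((n.toNat : Nat) : Int) = n := by omega
    rw [← hcast, loopA cards hne n.toNat hk1 hklen]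
    rfl
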